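-- pv_equiv track=rewrite | github.com/AlexJF12/teams-win-index-scratch | scripts/load_historical_nhl.py | split_city_team
-- ===== SOURCE A (Python) =====
-- from typing import Tuple
--
-- MULTIWORD_NICKNAMES = {
--     "Maple Leafs",
--     "Blue Jackets",
--     "Golden Knights",
--     "Red Wings",
-- }
--
-- def split_city_team(full_name: str) -> Tuple[str, str]:
--     """Split an NHL team full name into (city, nickname) using heuristics for multiword nicknames.
--     Examples:
--     - New York Rangers -> (New York, Rangers)
--     - Toronto Maple Leafs -> (Toronto, Maple Leafs)
--     - Vegas Golden Knights -> (Vegas, Golden Knights)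
--     - St. Louis Blues -> (St. Louis, Blues)
--     - San Jose Sharks -> (San Jose, Sharks)
--     """
--     name = str(full_name or "").strip()
--     if not name:
--         return "", ""
--     # Try multiword nickname suffix matches
--     for nick in MULTIWORD_NICKNAMES:
--         if name.endswith(nick):
--             city = name[: -len(nick)].strip()
--             # Remove trailing space if any leftover
--             if city.endswith(" "):
--                 city = city[:-1]
--             return city, nick
--     # Fallback: split on last space
--     if " " in name:
--         parts = name.rsplit(" ", 1)
--         return parts[0], parts[1]
--     return name, ""
-- ===== SOURCE B (Python) =====
-- # Dictionary keyed by the last word instead of a linear scan over nickname suffixes: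
-- # find the last space once, look the final word up, and verify the preceding word.
--
-- _NICK_FIRST = {
--     "Leafs": "Maple",
--     "Jackets": "Blue",
--     "Knights": "Golden",
--     "Wings": "Red",
-- }
--
-- def split_city_team(full_name):
--     name = str(full_name or "").strip()
--     if not name:
--         return "", ""
--     idx = name.rfind(" ")
--     if idx < 0:
--         return name, ""
--     last = name[idx + 1:]
--     first = _NICK_FIRST.get(last)
--     if first is not None and name[:idx].endswith(first):
--         return name[:idx - len(first)].strip(), first + " " + last
--     return name[:idx], last
-- ===== Notes on version B (the rewrite author's own statement) =====
-- stated objective: idiomatic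
-- what changed: Instead of scanning the set of multiword nicknames and calling endswith for each, B finds the last space once, looks the final word up in a dict keyed by nickname last word, and verifies the preceding word as a suffix; the fallback rsplit becomes the same single rfind.
import Mathlib
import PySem

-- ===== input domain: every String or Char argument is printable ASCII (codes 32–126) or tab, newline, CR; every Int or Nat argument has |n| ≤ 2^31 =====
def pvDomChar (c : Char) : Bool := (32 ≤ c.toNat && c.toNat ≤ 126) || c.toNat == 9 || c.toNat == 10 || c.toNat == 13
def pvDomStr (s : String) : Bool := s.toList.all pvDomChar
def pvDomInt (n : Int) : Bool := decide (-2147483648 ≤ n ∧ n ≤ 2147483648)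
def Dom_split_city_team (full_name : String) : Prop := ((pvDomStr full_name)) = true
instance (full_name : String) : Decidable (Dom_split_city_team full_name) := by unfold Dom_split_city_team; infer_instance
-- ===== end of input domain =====

-- B replaces A's scan over the nickname set with a single rfind and a dict lookup keyed
-- by the nickname's last word; the proof shows the two always return the same pair.

-- ===== PORT A =====
-- Python iterates MULTIWORD_NICKNAMES (a set, arbitrary order); at most one nickname can be
-- a suffix of a given name (none is a suffix of another), so any fixed order is exact.
def pvNicks : List (List Char) :=
  ["Maple Leafs".toList, "Blue Jackets".toList, "Golden Knights".toList, "Red Wings".toList]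

-- the for-loop over nicknames: first suffix match wins, returning (city, nick)
def pvMatchNick (name : List Char) : List (List Char) → Option (List Char × List Char)
  | [] => none
  | nick :: rest =>
    if PySem.Chars.endswith name nick then
      let city := PySem.Chars.strip (PySem.List.slice name none (some (-(nick.length : Int))))
      let city :=
        if PySem.Chars.endswith city [' '] then PySem.List.slice city none (some (-1)) else city
      some (city, nick)
    else pvMatchNick name rest

def split_city_team (full_name : String) : String × String :=
  let name := PySem.Chars.strip full_name.toList
  if name = [] then ("", "")
  else
    match pvMatchNick name pvNicks with
    | some (city, nick) => (String.ofList city, String.ofList nick)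
    | none =>
      if PySem.Chars.isIn [' '] name then
        -- hand port of name.rsplit(" ", 1) (single-char separator, maxsplit 1, ' ' ∈ name):
        -- exact — it splits at the last occurrence of ' '
        let i := (PySem.Chars.rfind name [' ']).toNat
        (String.ofList (name.take i), String.ofList (name.drop (i + 1)))
      else (String.ofList name, "")

-- ===== PORT B =====
def pvNickFirst : PySem.Dict (List Char) (List Char) :=
  PySem.Dict.ofList
    [("Leafs".toList, "Maple".toList), ("Jackets".toList, "Blue".toList),
     ("Knights".toList, "Golden".toList), ("Wings".toList, "Red".toList)]

def split_city_team_alt (full_name : String) : String × String :=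
  let name := PySem.Chars.strip full_name.toList
  if name = [] then ("", "")
  else
    let i := PySem.Chars.rfind name [' ']
    if i < 0 then (String.ofList name, "")
    else
      let idx := i.toNat
      let last := name.drop (idx + 1)
      match pvNickFirst.get? last with
      | some first =>
        if PySem.Chars.endswith (name.take idx) first then
          -- name[:idx - len(first)]: idx ≥ len(first) holds here (first is a suffix of
          -- name[:idx]), so the Python slice bound is nonnegative and equals this take
          (String.ofList (PySem.Chars.strip (name.take (idx - first.length))),
           String.ofList (first ++ ' ' :: last))
        else (String.ofList (name.take idx), String.ofList last)
      | none => (String.ofList (name.take idx), String.ofList last)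

-- ===== PRECONDITION & SPEC =====
def Spec_split_city_team (full_name : String) (out : String × String) : Prop := out = split_city_team_alt full_name
instance (full_name : String) (out : String × String) : Decidable (Spec_split_city_team full_name out) := by unfold Spec_split_city_team; infer_instance

-- ===== CLAIM (what is proved, stated in full; the proofs are below) =====
def Claim_equal_split_city_team : Prop := ∀ (full_name : String), Dom_split_city_team full_name → Spec_split_city_team full_name (split_city_team full_name)

-- ===== LEMMAS AND PROOFS =====

theorem pv_slice_neg (s : List Char) (n : Nat) (h0 : 0 < n) (h : n ≤ s.length) :
    PySem.List.slice s none (some (-(n:Int))) = s.take (s.length - n) := by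
  simp only [PySem.List.slice, PySem.List.clampIdx]
  split_ifs with h1 h2 <;> simp <;> omega

theorem pv_singleton_prefix (t : List Char) (c : Char) : [c] <+: t ↔ t.head? = some c := by
  cases t <;> simp [List.cons_prefix_cons, eq_comm]

theorem pv_head?_dropWhile {p : Char → Bool} {l : List Char} {a : Char}
    (h : (List.dropWhile p l).head? = some a) : p a = false := by
  induction l with
  | nil => simp [List.dropWhile] at h
  | cons b t ih =>
    by_cases hb : p b
    · exact ih (by simpa [List.dropWhile, hb] using h)
    · simp [List.dropWhile, hb] at h; subst h; simpa using hb

-- the "remove trailing space" branch in A is dead: a stripped string never ends in ' '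
theorem pv_strip_no_trailing_space (l : List Char) :
    PySem.Chars.endswith (PySem.Chars.strip l) [' '] = false := by
  rw [Bool.eq_false_iff]
  intro h
  rw [PySem.Chars.endswith_iff] at h
  rw [← List.reverse_prefix] at h
  simp only [PySem.Chars.strip, PySem.Chars.rstrip, List.reverse_reverse] at h
  rw [show ([' '] : List Char).reverse = [' '] from rfl, pv_singleton_prefix] at h
  have := pv_head?_dropWhile h
  simp [PySem.Chars.isspace] at this

theorem pv_go_spec (s sub : List Char) (k : Nat) :
    (PySem.Chars.rfind.go s sub k = -1 ∧ ∀ j ≤ k, ¬ sub <+: s.drop j)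
  ∨ (∃ j : Nat, j ≤ k ∧ PySem.Chars.rfind.go s sub k = (j : Int) ∧ sub <+: s.drop j ∧
      ∀ i, j < i → i ≤ k → ¬ sub <+: s.drop i) := by
  induction k with
  | zero =>
    by_cases h : sub.isPrefixOf s
    · right
      exact ⟨0, le_refl 0, by simp [PySem.Chars.rfind.go, h],
        by simpa using List.isPrefixOf_iff_prefix.mp h, by omega⟩
    · left
      refine ⟨by simp [PySem.Chars.rfind.go, h], ?_⟩
      intro j hj
      interval_cases j
      simpa using fun hc => h (List.isPrefixOf_iff_prefix.mpr (by simpa using hc))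
  | succ k ih =>
    by_cases h : sub.isPrefixOf (s.drop (k+1))
    · right
      refine ⟨k+1, le_refl _, by simp [PySem.Chars.rfind.go, h],
        List.isPrefixOf_iff_prefix.mp h, ?_⟩
      intro i h1 h2; omega
    · have hgo : PySem.Chars.rfind.go s sub (k+1) = PySem.Chars.rfind.go s sub k := by
        simp [PySem.Chars.rfind.go, h]
      have hnp : ¬ sub <+: s.drop (k+1) := fun hc => h (List.isPrefixOf_iff_prefix.mpr hc)
      rcases ih with ⟨h1, h2⟩ | ⟨j, hj, he, hp, hno⟩
      · left
        refine ⟨by rw [hgo, h1], ?_⟩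
        intro j hj
        rcases Nat.lt_or_ge j (k+1) with hl | hl
        · exact h2 j (by omega)
        · have : j = k+1 := by omega
          subst this; exact hnp
      · right
        refine ⟨j, by omega, by rw [hgo, he], hp, ?_⟩
        intro i h1 h2
        rcases Nat.lt_or_ge i (k+1) with hl | hl
        · exact hno i h1 (by omega)
        · have : i = k+1 := by omega
          subst this; exact hnp

-- s.rfind(c): either -1 and c not in s, or the index of the LAST occurrence of c
theorem pv_rfind_cases (s : List Char) (c : Char) :
    (PySem.Chars.rfind s [c] = -1 ∧ c ∉ s)
  ∨ (∃ idx : Nat, PySem.Chars.rfind s [c] = (idx : Int) ∧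
      s = s.take idx ++ c :: s.drop (idx + 1) ∧ c ∉ s.drop (idx + 1)) := by
  have hpref : ∀ j : Nat, [c] <+: s.drop j ↔ s[j]? = some c := by
    intro j; rw [pv_singleton_prefix, List.head?_drop]
  rcases pv_go_spec s [c] s.length with ⟨h1, h2⟩ | ⟨j, hj, he, hp, hno⟩
  · left
    refine ⟨h1, ?_⟩
    intro hmem
    obtain ⟨n, hn, hg⟩ := List.mem_iff_getElem.mp hmem
    exact h2 n (le_of_lt hn) ((hpref n).mpr (by simp [List.getElem?_eq_getElem hn, hg]))
  · right
    refine ⟨j, he, ?_, ?_⟩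
    · have hg : s[j]? = some c := (hpref j).mp hp
      have hdj : s.drop j = c :: s.drop (j+1) := by
        rw [← List.tail_drop]
        have hh : (s.drop j).head? = some c := by rw [List.head?_drop]; exact hg
        cases hd : s.drop j with
        | nil => rw [hd] at hh; simp at hh
        | cons a t =>
          have hac : a = c := by
            have h2 : (List.drop j s).head? = some c := by rw [List.head?_drop]; exact hg
            rw [hd] at h2
            simpa using h2
          simp [hac]
      conv_lhs => rw [← List.take_append_drop j s]
      rw [hdj]
    · intro hmem
      obtain ⟨n, hn, hg⟩ := List.mem_iff_getElem.mp hmem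
      have hg? : s[(j+1)+n]? = some c := by
        rw [← List.getElem?_drop]
        simp [List.getElem?_eq_getElem hn, hg]
      have hlen : (j+1)+n < s.length := (List.getElem?_eq_some_iff.mp hg?).1
      exact hno ((j+1)+n) (by omega) (by omega) ((hpref _).mpr hg?)

-- a two-word nickname is a suffix of p ++ ' ' :: q (q space-free) iff its last word IS q
-- and its first word is a suffix of p
theorem pv_align (p q f w : List Char) (hq : ' ' ∉ q) (hw : ' ' ∉ w) :
    (f ++ ' ' :: w) <:+ (p ++ ' ' :: q) ↔ (w = q ∧ f <:+ p) := by
  constructor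
  · intro h
    have hsw : (' ' :: w) <:+ (p ++ ' ' :: q) := by
      obtain ⟨u, hu⟩ := h
      exact ⟨u ++ f, by rw [← hu]; simp⟩
    have hsq : (' ' :: q) <:+ (p ++ ' ' :: q) := ⟨p, rfl⟩
    have hwq : w = q := by
      rcases List.suffix_or_suffix_of_suffix hsw hsq with hws | hqw
      · rcases List.suffix_cons_iff.mp hws with h' | h'
        · simpa using h'
        · exact absurd (h'.subset (by simp)) hq
      · rcases List.suffix_cons_iff.mp hqw with h' | h'
        · simpa using h'.symm
        · exact absurd (h'.subset (by simp)) hw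
    subst hwq
    obtain ⟨u, hu⟩ := h
    refine ⟨rfl, u, ?_⟩
    have h2 : (u ++ f) ++ (' ' :: w) = p ++ (' ' :: w) := by simpa using hu
    exact List.append_cancel_right h2
  · rintro ⟨hwq, u, hu⟩
    subst hwq
    exact ⟨u, by rw [← hu]; simp⟩

theorem pv_endswith_nick_iff (s p q f w : List Char)
    (hdec : s = p ++ ' ' :: q) (hq : ' ' ∉ q) (hw : ' ' ∉ w) :
    (PySem.Chars.endswith s (f ++ ' ' :: w) = true ↔ (w = q ∧ f <:+ p)) := by
  rw [PySem.Chars.endswith_iff, hdec, pv_align p q f w hq hw]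

theorem pv_nickFirst_items :
    pvNickFirst.items =
      [("Leafs".toList, "Maple".toList), ("Jackets".toList, "Blue".toList),
       ("Knights".toList, "Golden".toList), ("Wings".toList, "Red".toList)] := by
  decide

-- ===== VERDICT (by name: the statement is the Claim_ definition above) =====
theorem split_city_team_spec : Claim_equal_split_city_team := by
  intro full_name _hdom
  unfold Spec_split_city_team split_city_team split_city_team_alt
  set s : List Char := PySem.Chars.strip full_name.toList with hs_def
  by_cases hs : s = []
  · simp [hs]
  · simp only [if_neg hs]
    rcases pv_rfind_cases s ' ' with ⟨hr, hmem⟩ | ⟨idx, hr, hdec0, hq0⟩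
    · -- no space in s: the loop finds nothing and both sides return (s, "")
      have noNick : ∀ nick : List Char, ' ' ∈ nick → PySem.Chars.endswith s nick = false := by
        intro nick hn
        rw [Bool.eq_false_iff]
        intro h
        exact hmem (((PySem.Chars.endswith_iff s nick).mp h).subset hn)
      have e1 : PySem.Chars.endswith s (['M', 'a', 'p', 'l', 'e', ' ', 'L', 'e', 'a', 'f', 's']) = false := noNick _ (by decide)
      have e2 : PySem.Chars.endswith s (['B', 'l', 'u', 'e', ' ', 'J', 'a', 'c', 'k', 'e', 't', 's']) = false := noNick _ (by decide)
      have e3 : PySem.Chars.endswith s (['G', 'o', 'l', 'd', 'e', 'n', ' ', 'K', 'n', 'i', 'g', 'h', 't', 's']) = false := noNick _ (by decide)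
      have e4 : PySem.Chars.endswith s (['R', 'e', 'd', ' ', 'W', 'i', 'n', 'g', 's']) = false := noNick _ (by decide)
      have hin : PySem.Chars.isIn [' '] s = false := by
        rw [Bool.eq_false_iff]
        intro h
        exact hmem (((PySem.Chars.isIn_iff_infix [' '] s).mp h).subset (by simp))
      simp [pvMatchNick, pvNicks, e1, e2, e3, e4, hin, hr]
    · -- s = (s.take idx) ++ ' ' :: (s.drop (idx+1)), the last space at position idx
      have hlen1 : s.length = idx + 1 + (List.drop (idx + 1) s).length := by
        have h1 := congrArg List.length hdec0
        simp at h1 ⊢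
        omega
      have hlen2 : (List.take idx s).length = idx := by
        rw [List.length_take]
        omega
      have E : ∀ f w : List Char, ' ' ∉ w →
          (PySem.Chars.endswith s (f ++ ' ' :: w) = true ↔
            (w = List.drop (idx + 1) s ∧ f <:+ List.take idx s)) :=
        fun f w hw => pv_endswith_nick_iff s _ _ f w hdec0 hq0 hw
      have hIdx : ¬ ((idx : Int) < 0) := by omega
      have hin : PySem.Chars.isIn [' '] s = true := by
        rw [PySem.Chars.isIn_iff_infix]
        exact ⟨List.take idx s, List.drop (idx + 1) s, by simpa using hdec0.symm⟩
      by_cases k1 : List.drop (idx + 1) s = (['L', 'e', 'a', 'f', 's'])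
      · have hget : pvNickFirst.get? (['L', 'e', 'a', 'f', 's']) = some (['M', 'a', 'p', 'l', 'e']) := by decide
        have hwlen : (List.drop (idx + 1) s).length = 5 := by rw [k1]; decide
        have hslen : s.length = idx + 1 + 5 := by omega
        have e2 : PySem.Chars.endswith s (['B', 'l', 'u', 'e', ' ', 'J', 'a', 'c', 'k', 'e', 't', 's']) = false := by
          rw [show ((['B', 'l', 'u', 'e', ' ', 'J', 'a', 'c', 'k', 'e', 't', 's']) : List Char) = (['B', 'l', 'u', 'e']) ++ ' ' :: (['J', 'a', 'c', 'k', 'e', 't', 's']) from by decide,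
            Bool.eq_false_iff]
          intro h
          exact absurd ((E _ _ (by decide)).mp h).1 (by rw [k1]; decide)
        have e3 : PySem.Chars.endswith s (['G', 'o', 'l', 'd', 'e', 'n', ' ', 'K', 'n', 'i', 'g', 'h', 't', 's']) = false := by
          rw [show ((['G', 'o', 'l', 'd', 'e', 'n', ' ', 'K', 'n', 'i', 'g', 'h', 't', 's']) : List Char) = (['G', 'o', 'l', 'd', 'e', 'n']) ++ ' ' :: (['K', 'n', 'i', 'g', 'h', 't', 's']) from by decide,
            Bool.eq_false_iff]
          intro h
          exact absurd ((E _ _ (by decide)).mp h).1 (by rw [k1]; decide)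
        have e4 : PySem.Chars.endswith s (['R', 'e', 'd', ' ', 'W', 'i', 'n', 'g', 's']) = false := by
          rw [show ((['R', 'e', 'd', ' ', 'W', 'i', 'n', 'g', 's']) : List Char) = (['R', 'e', 'd']) ++ ' ' :: (['W', 'i', 'n', 'g', 's']) from by decide,
            Bool.eq_false_iff]
          intro h
          exact absurd ((E _ _ (by decide)).mp h).1 (by rw [k1]; decide)
        by_cases hf : PySem.Chars.endswith (List.take idx s) (['M', 'a', 'p', 'l', 'e']) = true
        · have hfs : ((['M', 'a', 'p', 'l', 'e']) : List Char) <:+ List.take idx s :=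
            (PySem.Chars.endswith_iff _ _).mp hf
          have hfi : 5 ≤ idx := by
            have h := hfs.length_le
            rw [show ((['M', 'a', 'p', 'l', 'e']) : List Char).length = 5 from by decide, hlen2] at h
            exact h
          have e1 : PySem.Chars.endswith s (['M', 'a', 'p', 'l', 'e', ' ', 'L', 'e', 'a', 'f', 's']) = true := by
            rw [show ((['M', 'a', 'p', 'l', 'e', ' ', 'L', 'e', 'a', 'f', 's']) : List Char) = (['M', 'a', 'p', 'l', 'e']) ++ ' ' :: (['L', 'e', 'a', 'f', 's']) from by decide]
            exact (E _ _ (by decide)).mpr ⟨k1.symm, hfs⟩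
          have hsl : PySem.List.slice s none (some (-11)) = List.take (idx - 5) s := by
            rw [show ((-11 : Int)) = (-((11 : Nat) : Int)) from by decide,
              pv_slice_neg s 11 (by omega) (by omega)]
            congr 1
            omega
          simp [pvMatchNick, pvNicks, e1, hsl, pv_strip_no_trailing_space, hget, hf,
            hr, hIdx, k1]
        have e1 : PySem.Chars.endswith s (['M', 'a', 'p', 'l', 'e', ' ', 'L', 'e', 'a', 'f', 's']) = false := by
          rw [show ((['M', 'a', 'p', 'l', 'e', ' ', 'L', 'e', 'a', 'f', 's']) : List Char) = (['M', 'a', 'p', 'l', 'e']) ++ ' ' :: (['L', 'e', 'a', 'f', 's']) from by decide,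
            Bool.eq_false_iff]
          intro h
          exact hf ((PySem.Chars.endswith_iff _ _).mpr ((E _ _ (by decide)).mp h).2)
        have hget : pvNickFirst.get? (List.drop (idx + 1) s) = some (['M', 'a', 'p', 'l', 'e']) := by
          rw [k1]; decide
        simp [pvMatchNick, pvNicks, e1, e2, e3, e4, hget, hf, hin, hr, hIdx]
      by_cases k2 : List.drop (idx + 1) s = (['J', 'a', 'c', 'k', 'e', 't', 's'])
      · have hget : pvNickFirst.get? (['J', 'a', 'c', 'k', 'e', 't', 's']) = some (['B', 'l', 'u', 'e']) := by decide
        have hwlen : (List.drop (idx + 1) s).length = 7 := by rw [k2]; decide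
        have hslen : s.length = idx + 1 + 7 := by omega
        have e1 : PySem.Chars.endswith s (['M', 'a', 'p', 'l', 'e', ' ', 'L', 'e', 'a', 'f', 's']) = false := by
          rw [show ((['M', 'a', 'p', 'l', 'e', ' ', 'L', 'e', 'a', 'f', 's']) : List Char) = (['M', 'a', 'p', 'l', 'e']) ++ ' ' :: (['L', 'e', 'a', 'f', 's']) from by decide,
            Bool.eq_false_iff]
          intro h
          exact absurd ((E _ _ (by decide)).mp h).1 (by rw [k2]; decide)
        have e3 : PySem.Chars.endswith s (['G', 'o', 'l', 'd', 'e', 'n', ' ', 'K', 'n', 'i', 'g', 'h', 't', 's']) = false := by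
          rw [show ((['G', 'o', 'l', 'd', 'e', 'n', ' ', 'K', 'n', 'i', 'g', 'h', 't', 's']) : List Char) = (['G', 'o', 'l', 'd', 'e', 'n']) ++ ' ' :: (['K', 'n', 'i', 'g', 'h', 't', 's']) from by decide,
            Bool.eq_false_iff]
          intro h
          exact absurd ((E _ _ (by decide)).mp h).1 (by rw [k2]; decide)
        have e4 : PySem.Chars.endswith s (['R', 'e', 'd', ' ', 'W', 'i', 'n', 'g', 's']) = false := by
          rw [show ((['R', 'e', 'd', ' ', 'W', 'i', 'n', 'g', 's']) : List Char) = (['R', 'e', 'd']) ++ ' ' :: (['W', 'i', 'n', 'g', 's']) from by decide,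
            Bool.eq_false_iff]
          intro h
          exact absurd ((E _ _ (by decide)).mp h).1 (by rw [k2]; decide)
        by_cases hf : PySem.Chars.endswith (List.take idx s) (['B', 'l', 'u', 'e']) = true
        · have hfs : ((['B', 'l', 'u', 'e']) : List Char) <:+ List.take idx s :=
            (PySem.Chars.endswith_iff _ _).mp hf
          have hfi : 4 ≤ idx := by
            have h := hfs.length_le
            rw [show ((['B', 'l', 'u', 'e']) : List Char).length = 4 from by decide, hlen2] at h
            exact h
          have e2 : PySem.Chars.endswith s (['B', 'l', 'u', 'e', ' ', 'J', 'a', 'c', 'k', 'e', 't', 's']) = true := by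
            rw [show ((['B', 'l', 'u', 'e', ' ', 'J', 'a', 'c', 'k', 'e', 't', 's']) : List Char) = (['B', 'l', 'u', 'e']) ++ ' ' :: (['J', 'a', 'c', 'k', 'e', 't', 's']) from by decide]
            exact (E _ _ (by decide)).mpr ⟨k2.symm, hfs⟩
          have hsl : PySem.List.slice s none (some (-12)) = List.take (idx - 4) s := by
            rw [show ((-12 : Int)) = (-((12 : Nat) : Int)) from by decide,
              pv_slice_neg s 12 (by omega) (by omega)]
            congr 1
            omega
          simp [pvMatchNick, pvNicks, e1, e2, hsl, pv_strip_no_trailing_space, hget, hf,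
            hr, hIdx, k2]
        have e2 : PySem.Chars.endswith s (['B', 'l', 'u', 'e', ' ', 'J', 'a', 'c', 'k', 'e', 't', 's']) = false := by
          rw [show ((['B', 'l', 'u', 'e', ' ', 'J', 'a', 'c', 'k', 'e', 't', 's']) : List Char) = (['B', 'l', 'u', 'e']) ++ ' ' :: (['J', 'a', 'c', 'k', 'e', 't', 's']) from by decide,
            Bool.eq_false_iff]
          intro h
          exact hf ((PySem.Chars.endswith_iff _ _).mpr ((E _ _ (by decide)).mp h).2)
        have hget : pvNickFirst.get? (List.drop (idx + 1) s) = some (['B', 'l', 'u', 'e']) := by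
          rw [k2]; decide
        simp [pvMatchNick, pvNicks, e1, e2, e3, e4, hget, hf, hin, hr, hIdx]
      by_cases k3 : List.drop (idx + 1) s = (['K', 'n', 'i', 'g', 'h', 't', 's'])
      · have hget : pvNickFirst.get? (['K', 'n', 'i', 'g', 'h', 't', 's']) = some (['G', 'o', 'l', 'd', 'e', 'n']) := by decide
        have hwlen : (List.drop (idx + 1) s).length = 7 := by rw [k3]; decide
        have hslen : s.length = idx + 1 + 7 := by omega
        have e1 : PySem.Chars.endswith s (['M', 'a', 'p', 'l', 'e', ' ', 'L', 'e', 'a', 'f', 's']) = false := by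
          rw [show ((['M', 'a', 'p', 'l', 'e', ' ', 'L', 'e', 'a', 'f', 's']) : List Char) = (['M', 'a', 'p', 'l', 'e']) ++ ' ' :: (['L', 'e', 'a', 'f', 's']) from by decide,
            Bool.eq_false_iff]
          intro h
          exact absurd ((E _ _ (by decide)).mp h).1 (by rw [k3]; decide)
        have e2 : PySem.Chars.endswith s (['B', 'l', 'u', 'e', ' ', 'J', 'a', 'c', 'k', 'e', 't', 's']) = false := by
          rw [show ((['B', 'l', 'u', 'e', ' ', 'J', 'a', 'c', 'k', 'e', 't', 's']) : List Char) = (['B', 'l', 'u', 'e']) ++ ' ' :: (['J', 'a', 'c', 'k', 'e', 't', 's']) from by decide,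
            Bool.eq_false_iff]
          intro h
          exact absurd ((E _ _ (by decide)).mp h).1 (by rw [k3]; decide)
        have e4 : PySem.Chars.endswith s (['R', 'e', 'd', ' ', 'W', 'i', 'n', 'g', 's']) = false := by
          rw [show ((['R', 'e', 'd', ' ', 'W', 'i', 'n', 'g', 's']) : List Char) = (['R', 'e', 'd']) ++ ' ' :: (['W', 'i', 'n', 'g', 's']) from by decide,
            Bool.eq_false_iff]
          intro h
          exact absurd ((E _ _ (by decide)).mp h).1 (by rw [k3]; decide)
        by_cases hf : PySem.Chars.endswith (List.take idx s) (['G', 'o', 'l', 'd', 'e', 'n']) = true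
        · have hfs : ((['G', 'o', 'l', 'd', 'e', 'n']) : List Char) <:+ List.take idx s :=
            (PySem.Chars.endswith_iff _ _).mp hf
          have hfi : 6 ≤ idx := by
            have h := hfs.length_le
            rw [show ((['G', 'o', 'l', 'd', 'e', 'n']) : List Char).length = 6 from by decide, hlen2] at h
            exact h
          have e3 : PySem.Chars.endswith s (['G', 'o', 'l', 'd', 'e', 'n', ' ', 'K', 'n', 'i', 'g', 'h', 't', 's']) = true := by
            rw [show ((['G', 'o', 'l', 'd', 'e', 'n', ' ', 'K', 'n', 'i', 'g', 'h', 't', 's']) : List Char) = (['G', 'o', 'l', 'd', 'e', 'n']) ++ ' ' :: (['K', 'n', 'i', 'g', 'h', 't', 's']) from by decide]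
            exact (E _ _ (by decide)).mpr ⟨k3.symm, hfs⟩
          have hsl : PySem.List.slice s none (some (-14)) = List.take (idx - 6) s := by
            rw [show ((-14 : Int)) = (-((14 : Nat) : Int)) from by decide,
              pv_slice_neg s 14 (by omega) (by omega)]
            congr 1
            omega
          simp [pvMatchNick, pvNicks, e1, e2, e3, hsl, pv_strip_no_trailing_space, hget, hf,
            hr, hIdx, k3]
        have e3 : PySem.Chars.endswith s (['G', 'o', 'l', 'd', 'e', 'n', ' ', 'K', 'n', 'i', 'g', 'h', 't', 's']) = false := by
          rw [show ((['G', 'o', 'l', 'd', 'e', 'n', ' ', 'K', 'n', 'i', 'g', 'h', 't', 's']) : List Char) = (['G', 'o', 'l', 'd', 'e', 'n']) ++ ' ' :: (['K', 'n', 'i', 'g', 'h', 't', 's']) from by decide,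
            Bool.eq_false_iff]
          intro h
          exact hf ((PySem.Chars.endswith_iff _ _).mpr ((E _ _ (by decide)).mp h).2)
        have hget : pvNickFirst.get? (List.drop (idx + 1) s) = some (['G', 'o', 'l', 'd', 'e', 'n']) := by
          rw [k3]; decide
        simp [pvMatchNick, pvNicks, e1, e2, e3, e4, hget, hf, hin, hr, hIdx]
      by_cases k4 : List.drop (idx + 1) s = (['W', 'i', 'n', 'g', 's'])
      · have hget : pvNickFirst.get? (['W', 'i', 'n', 'g', 's']) = some (['R', 'e', 'd']) := by decide
        have hwlen : (List.drop (idx + 1) s).length = 5 := by rw [k4]; decide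
        have hslen : s.length = idx + 1 + 5 := by omega
        have e1 : PySem.Chars.endswith s (['M', 'a', 'p', 'l', 'e', ' ', 'L', 'e', 'a', 'f', 's']) = false := by
          rw [show ((['M', 'a', 'p', 'l', 'e', ' ', 'L', 'e', 'a', 'f', 's']) : List Char) = (['M', 'a', 'p', 'l', 'e']) ++ ' ' :: (['L', 'e', 'a', 'f', 's']) from by decide,
            Bool.eq_false_iff]
          intro h
          exact absurd ((E _ _ (by decide)).mp h).1 (by rw [k4]; decide)
        have e2 : PySem.Chars.endswith s (['B', 'l', 'u', 'e', ' ', 'J', 'a', 'c', 'k', 'e', 't', 's']) = false := by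
          rw [show ((['B', 'l', 'u', 'e', ' ', 'J', 'a', 'c', 'k', 'e', 't', 's']) : List Char) = (['B', 'l', 'u', 'e']) ++ ' ' :: (['J', 'a', 'c', 'k', 'e', 't', 's']) from by decide,
            Bool.eq_false_iff]
          intro h
          exact absurd ((E _ _ (by decide)).mp h).1 (by rw [k4]; decide)
        have e3 : PySem.Chars.endswith s (['G', 'o', 'l', 'd', 'e', 'n', ' ', 'K', 'n', 'i', 'g', 'h', 't', 's']) = false := by
          rw [show ((['G', 'o', 'l', 'd', 'e', 'n', ' ', 'K', 'n', 'i', 'g', 'h', 't', 's']) : List Char) = (['G', 'o', 'l', 'd', 'e', 'n']) ++ ' ' :: (['K', 'n', 'i', 'g', 'h', 't', 's']) from by decide,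
            Bool.eq_false_iff]
          intro h
          exact absurd ((E _ _ (by decide)).mp h).1 (by rw [k4]; decide)
        by_cases hf : PySem.Chars.endswith (List.take idx s) (['R', 'e', 'd']) = true
        · have hfs : ((['R', 'e', 'd']) : List Char) <:+ List.take idx s :=
            (PySem.Chars.endswith_iff _ _).mp hf
          have hfi : 3 ≤ idx := by
            have h := hfs.length_le
            rw [show ((['R', 'e', 'd']) : List Char).length = 3 from by decide, hlen2] at h
            exact h
          have e4 : PySem.Chars.endswith s (['R', 'e', 'd', ' ', 'W', 'i', 'n', 'g', 's']) = true := by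
            rw [show ((['R', 'e', 'd', ' ', 'W', 'i', 'n', 'g', 's']) : List Char) = (['R', 'e', 'd']) ++ ' ' :: (['W', 'i', 'n', 'g', 's']) from by decide]
            exact (E _ _ (by decide)).mpr ⟨k4.symm, hfs⟩
          have hsl : PySem.List.slice s none (some (-9)) = List.take (idx - 3) s := by
            rw [show ((-9 : Int)) = (-((9 : Nat) : Int)) from by decide,
              pv_slice_neg s 9 (by omega) (by omega)]
            congr 1
            omega
          simp [pvMatchNick, pvNicks, e1, e2, e3, e4, hsl, pv_strip_no_trailing_space, hget, hf,
            hr, hIdx, k4]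
        have e4 : PySem.Chars.endswith s (['R', 'e', 'd', ' ', 'W', 'i', 'n', 'g', 's']) = false := by
          rw [show ((['R', 'e', 'd', ' ', 'W', 'i', 'n', 'g', 's']) : List Char) = (['R', 'e', 'd']) ++ ' ' :: (['W', 'i', 'n', 'g', 's']) from by decide,
            Bool.eq_false_iff]
          intro h
          exact hf ((PySem.Chars.endswith_iff _ _).mpr ((E _ _ (by decide)).mp h).2)
        have hget : pvNickFirst.get? (List.drop (idx + 1) s) = some (['R', 'e', 'd']) := by
          rw [k4]; decide
        simp [pvMatchNick, pvNicks, e1, e2, e3, e4, hget, hf, hin, hr, hIdx]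
      -- the last word matches no nickname: the dict misses and no suffix test fires
      have c1 : (((['L', 'e', 'a', 'f', 's']) : List Char) == List.drop (idx + 1) s) = false :=
        beq_eq_false_iff_ne.mpr (fun h => k1 h.symm)
      have c2 : (((['J', 'a', 'c', 'k', 'e', 't', 's']) : List Char) == List.drop (idx + 1) s) = false :=
        beq_eq_false_iff_ne.mpr (fun h => k2 h.symm)
      have c3 : (((['K', 'n', 'i', 'g', 'h', 't', 's']) : List Char) == List.drop (idx + 1) s) = false :=
        beq_eq_false_iff_ne.mpr (fun h => k3 h.symm)
      have c4 : (((['W', 'i', 'n', 'g', 's']) : List Char) == List.drop (idx + 1) s) = false :=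
        beq_eq_false_iff_ne.mpr (fun h => k4 h.symm)
      have hget : pvNickFirst.get? (List.drop (idx + 1) s) = none := by
        simp [PySem.Dict.get?, pv_nickFirst_items, List.find?, c1, c2, c3, c4]
      have e1 : PySem.Chars.endswith s (['M', 'a', 'p', 'l', 'e', ' ', 'L', 'e', 'a', 'f', 's']) = false := by
        rw [show ((['M', 'a', 'p', 'l', 'e', ' ', 'L', 'e', 'a', 'f', 's']) : List Char) = (['M', 'a', 'p', 'l', 'e']) ++ ' ' :: (['L', 'e', 'a', 'f', 's']) from by decide,
          Bool.eq_false_iff]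
        intro h
        exact k1 ((E _ _ (by decide)).mp h).1.symm
      have e2 : PySem.Chars.endswith s (['B', 'l', 'u', 'e', ' ', 'J', 'a', 'c', 'k', 'e', 't', 's']) = false := by
        rw [show ((['B', 'l', 'u', 'e', ' ', 'J', 'a', 'c', 'k', 'e', 't', 's']) : List Char) = (['B', 'l', 'u', 'e']) ++ ' ' :: (['J', 'a', 'c', 'k', 'e', 't', 's']) from by decide,
          Bool.eq_false_iff]
        intro h
        exact k2 ((E _ _ (by decide)).mp h).1.symm
      have e3 : PySem.Chars.endswith s (['G', 'o', 'l', 'd', 'e', 'n', ' ', 'K', 'n', 'i', 'g', 'h', 't', 's']) = false := by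
        rw [show ((['G', 'o', 'l', 'd', 'e', 'n', ' ', 'K', 'n', 'i', 'g', 'h', 't', 's']) : List Char) = (['G', 'o', 'l', 'd', 'e', 'n']) ++ ' ' :: (['K', 'n', 'i', 'g', 'h', 't', 's']) from by decide,
          Bool.eq_false_iff]
        intro h
        exact k3 ((E _ _ (by decide)).mp h).1.symm
      have e4 : PySem.Chars.endswith s (['R', 'e', 'd', ' ', 'W', 'i', 'n', 'g', 's']) = false := by
        rw [show ((['R', 'e', 'd', ' ', 'W', 'i', 'n', 'g', 's']) : List Char) = (['R', 'e', 'd']) ++ ' ' :: (['W', 'i', 'n', 'g', 's']) from by decide,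
          Bool.eq_false_iff]
        intro h
        exact k4 ((E _ _ (by decide)).mp h).1.symm
      simp [pvMatchNick, pvNicks, e1, e2, e3, e4, hget, hin, hr, hIdx]
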